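-- pv_equiv track=rewrite | github.com/r-udd/adventofcode2018 | day5/both.py | removePolymers
-- ===== SOURCE A (Python) =====
-- def shouldBeRemoved(char1, char2):
--     return char1.lower() == char2.lower() and char1 != char2
--
-- def removePolymers (charList):
--     index = 0
--     removedAny = False
--     while (True):
--         if index + 1 >= len(charList):
--             index = 0
--             if not removedAny:
--                 break
--             removedAny = False
--
--         if shouldBeRemoved(charList[index], charList[index+1]):
--             charList = charList[:index] + charList[index+2:]
--             removedAny = True
--         else:
--             index += 1
--     return len(charList)
-- ===== SOURCE B (Python) =====
-- def shouldBeRemoved(char1, char2):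
--     return char1.lower() == char2.lower() and char1 != char2
--
-- def removePolymers(charList):
--     stack = []
--     for c in charList:
--         if stack and shouldBeRemoved(stack[-1], c):
--             stack.pop()
--         else:
--             stack.append(c)
--     return len(stack)
-- ===== Notes on version B (the rewrite author's own statement) =====
-- stated objective: simpler
-- what changed: replaced A's mutate-and-rescan-until-fixpoint loop (re-slicing the string after every removal and restarting the scan whenever a pass removed something) with a single left-to-right pass that keeps a stack and pops the top when it reacts with the incoming character
-- outside the precondition, e.g. on removePolymers('aA'): A raises IndexError, B returns 0; on removePolymers('abBA'): A raises IndexError, B returns 0; on removePolymers('aAb'): A raises IndexError, B returns 1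
-- crash fix: A raises IndexError whenever the input has at least 2 characters but the fully reacted polymer is shorter than 2 (after the final removal the reset path reads charList[0]/charList[1] without a bound check); B returns the reacted length (0 or 1) there. — e.g. on removePolymers("aA"): A raises IndexError, B returns 0
import Mathlib
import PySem

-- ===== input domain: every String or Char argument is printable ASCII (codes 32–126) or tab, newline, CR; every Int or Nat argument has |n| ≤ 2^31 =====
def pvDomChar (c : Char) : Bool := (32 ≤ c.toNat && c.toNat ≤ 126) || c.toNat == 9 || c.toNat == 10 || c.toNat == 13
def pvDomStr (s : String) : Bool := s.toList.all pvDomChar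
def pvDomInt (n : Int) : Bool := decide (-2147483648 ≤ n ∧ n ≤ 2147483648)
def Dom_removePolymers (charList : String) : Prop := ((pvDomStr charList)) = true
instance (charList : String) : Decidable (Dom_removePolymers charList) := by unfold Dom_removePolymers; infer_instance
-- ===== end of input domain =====

-- B replaces A's repeated rescans-until-fixpoint with one left-to-right stack pass.

-- ===== PORT A =====
-- shouldBeRemoved(char1, char2): chars are 1-char strings; .lower() is PySem.Chars.lowerChar (exact on Dom's ASCII)
def pvShouldBeRemoved (c1 c2 : Char) : Bool :=
  (PySem.Chars.lowerChar c1 == PySem.Chars.lowerChar c2) && (c1 != c2)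

-- charList[:i] + charList[i+2:]
def pvCut (cl : List Char) (i : Nat) : List Char :=
  PySem.List.slice cl none (some (i : Int)) ++ PySem.List.slice cl (some ((i : Int) + 2)) none

-- facts used only to justify the loop's termination measure
theorem pvCut_eq_take_drop (cl : List Char) (i : Nat) :
    pvCut cl i = cl.take i ++ cl.drop (i + 2) := by
  have h2 : ((i : Int) + 2) = ((i + 2 : Nat) : Int) := by push_cast; ring
  rw [pvCut, h2, PySem.List.slice_to_natCast, PySem.List.slice_from_natCast]

theorem pvCut_length (cl : List Char) (i : Nat) (h : i + 1 < cl.length) :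
    (pvCut cl i).length = cl.length - 2 := by
  rw [pvCut_eq_take_drop]
  simp only [List.length_append, List.length_take, List.length_drop]
  omega

theorem pvSome_lt {cl : List Char} {i : Nat} {a : Char}
    (h : PySem.List.pyGet? cl (i : Int) = some a) : i < cl.length := by
  rw [PySem.List.pyGet?_natCast] at h
  exact (List.getElem?_eq_some_iff.mp h).1

-- the while-True loop of A: state (charList, index, removedAny)
def pvGoA (cl : List Char) (index : Nat) (removedAny : Bool) : Int :=
  if index + 1 ≥ cl.length then
    if removedAny = false then (cl.length : Int)
    else
      -- reset: index = 0, removedAny = False, then the compare at index 0 (no bound re-check, as in A)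
      match h1 : PySem.List.pyGet? cl ((0 : Nat) : Int), h2 : PySem.List.pyGet? cl ((1 : Nat) : Int) with
      | some a, some b =>
        if pvShouldBeRemoved a b then pvGoA (pvCut cl 0) 0 true
        else pvGoA cl 1 false
      | _, _ => 0  -- Python raises IndexError here; excluded by Pre_removePolymers
  else
    match h1 : PySem.List.pyGet? cl ((index : Nat) : Int), h2 : PySem.List.pyGet? cl ((index + 1 : Nat) : Int) with
    | some a, some b =>
      if pvShouldBeRemoved a b then pvGoA (pvCut cl index) index true
      else pvGoA cl (index + 1) removedAny
    | _, _ => 0  -- unreachable: index + 1 < len(charList)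
termination_by (cl.length, (if removedAny then 1 else 0 : Nat), cl.length - index)
decreasing_by
  · have := pvSome_lt h2
    have := pvCut_length cl 0 (by omega)
    exact Prod.Lex.left _ _ (by omega)
  · apply Prod.Lex.right
    apply Prod.Lex.left
    cases removedAny <;> simp_all
  · have := pvSome_lt h2
    have := pvCut_length cl index (by omega)
    exact Prod.Lex.left _ _ (by omega)
  · exact Prod.Lex.right _ (Prod.Lex.right _ (by omega))

def removePolymers (charList : String) : Int :=
  pvGoA charList.toList 0 false

-- ===== PORT B =====
-- the stack is kept top-first: Python's stack[-1] is the head, pop is the tail, append is cons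
def pvStep (stack : List Char) (c : Char) : List Char :=
  match stack with
  | h :: t => if pvShouldBeRemoved h c then t else c :: h :: t
  | [] => [c]

def removePolymers_alt (charList : String) : Int :=
  ((charList.toList.foldl pvStep []).length : Int)

-- ===== PRECONDITION & SPEC =====
-- A raises IndexError exactly when the input has ≥ 2 characters but the fully reacted polymer is
-- shorter than 2 (after the last removal the reset path reads charList[0]/charList[1] without a
-- bound check); Pre_ excludes exactly those inputs.  The crash condition genuinely depends on the
-- reaction result, so Pre_ computes the reacted length with the one-pass stack reduction.
def Pre_removePolymers (charList : String) : Prop :=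
  charList.toList.length ≤ 1 ∨ 2 ≤ (charList.toList.foldl pvStep []).length
instance (charList : String) : Decidable (Pre_removePolymers charList) := by
  unfold Pre_removePolymers; infer_instance

def pvWitness_removePolymers : String := "abc"

-- A raises IndexError on every input of ≥ 2 characters whose fully reacted polymer has fewer than
-- 2 characters; B returns that reacted length (0 or 1) there.
def Raises_removePolymers (charList : String) : Prop :=
  2 ≤ charList.toList.length ∧ (charList.toList.foldl pvStep []).length ≤ 1
instance (charList : String) : Decidable (Raises_removePolymers charList) := by
  unfold Raises_removePolymers; infer_instance

def pvRaiseWitness_removePolymers : String := "aA"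
def pvRaiseWitnessOut_removePolymers : Int := 0

def Spec_removePolymers (charList : String) (out : Int) : Prop := out = removePolymers_alt charList
instance (charList : String) (out : Int) : Decidable (Spec_removePolymers charList out) := by
  unfold Spec_removePolymers; infer_instance

-- ===== CLAIM (what is proved, stated in full; the proofs are below) =====
def Claim_equal_removePolymers : Prop := ∀ (charList : String), Dom_removePolymers charList → Pre_removePolymers charList → Spec_removePolymers charList (removePolymers charList)

def Claim_raises_removePolymers : Prop := (∀ (charList : String), Dom_removePolymers charList → Raises_removePolymers charList → ¬ Pre_removePolymers charList) ∧ (Dom_removePolymers (pvRaiseWitness_removePolymers) ∧ Raises_removePolymers (pvRaiseWitness_removePolymers) ∧ removePolymers_alt (pvRaiseWitness_removePolymers) = pvRaiseWitnessOut_removePolymers)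

-- ===== LEMMAS AND PROOFS =====

theorem pvShould_symm (a b : Char) : pvShouldBeRemoved a b = pvShouldBeRemoved b a := by
  simp only [pvShouldBeRemoved, bne]
  rw [@BEq.comm _ _ _ (PySem.Chars.lowerChar a), @BEq.comm Char _ _ a b]

theorem pvToNat_ofNat (n : Nat) (h : n < 55296) : (Char.ofNat n).toNat = n := by
  have hv : n.isValidChar := Or.inl h
  rw [Char.ofNat, dif_pos hv]
  simp [Char.toNat, Char.ofNatAux]

theorem pvChar_eq {c d : Char} (h : c.toNat = d.toNat) : c = d :=
  Char.ext (UInt32.toNat_inj.mp h)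

theorem pvLe_toNat {x : Char} (h : x ≤ 'Z') : x.toNat ≤ 90 := by
  have := Char.le_def.mp h; simpa using this

-- a character x ≠ a with the same .lower() as a is a's case-flip
theorem pvLower_ne {x a : Char} (h1 : PySem.Chars.lowerChar x = PySem.Chars.lowerChar a)
    (h2 : x ≠ a) :
    ('A' ≤ a ∧ a ≤ 'Z' ∧ x = Char.ofNat (a.toNat + 32)) ∨
    (¬('A' ≤ a ∧ a ≤ 'Z') ∧ x ≤ 'Z' ∧ Char.ofNat (x.toNat + 32) = a) := by
  unfold PySem.Chars.lowerChar PySem.Chars.isupper at h1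
  by_cases hxu : 'A' ≤ x ∧ x ≤ 'Z' <;> by_cases hau : 'A' ≤ a ∧ a ≤ 'Z'
  · rw [if_pos (by simpa [Bool.and_eq_true, decide_eq_true_eq] using hxu),
      if_pos (by simpa [Bool.and_eq_true, decide_eq_true_eq] using hau)] at h1
    have hx90 := pvLe_toNat hxu.2
    have ha90 := pvLe_toNat hau.2
    have := congrArg Char.toNat h1
    rw [pvToNat_ofNat _ (by omega), pvToNat_ofNat _ (by omega)] at this
    exact absurd (pvChar_eq (by omega)) h2
  · rw [if_pos (by simpa [Bool.and_eq_true, decide_eq_true_eq] using hxu),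
      if_neg (by simpa [Bool.and_eq_true, decide_eq_true_eq] using hau)] at h1
    exact Or.inr ⟨hau, hxu.2, h1⟩
  · rw [if_neg (by simpa [Bool.and_eq_true, decide_eq_true_eq] using hxu),
      if_pos (by simpa [Bool.and_eq_true, decide_eq_true_eq] using hau)] at h1
    exact Or.inl ⟨hau.1, hau.2, h1⟩
  · rw [if_neg (by simpa [Bool.and_eq_true, decide_eq_true_eq] using hxu),
      if_neg (by simpa [Bool.and_eq_true, decide_eq_true_eq] using hau)] at h1
    exact absurd h1 h2

-- the reaction partner of a character is unique
theorem pvShould_uniq {x b a : Char} (hx : pvShouldBeRemoved x a = true)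
    (hb : pvShouldBeRemoved b a = true) : x = b := by
  simp only [pvShouldBeRemoved, Bool.and_eq_true, beq_iff_eq, bne_iff_ne, ne_eq] at hx hb
  rcases pvLower_ne hx.1 hx.2 with ⟨ha1, ha2, hx'⟩ | ⟨hna, hxZ, hx'⟩
  · rcases pvLower_ne hb.1 hb.2 with ⟨_, _, hb'⟩ | ⟨hnb, hbZ, hb'⟩
    · rw [hx', hb']
    · exact absurd ⟨ha1, ha2⟩ hnb
  · rcases pvLower_ne hb.1 hb.2 with ⟨ha1, ha2, hb'⟩ | ⟨hnb, hbZ, hb'⟩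
    · exact absurd ⟨ha1, ha2⟩ hna
    · have hx90 := pvLe_toNat hxZ
      have hb90 := pvLe_toNat hbZ
      have := congrArg Char.toNat (hx'.trans hb'.symm)
      rw [pvToNat_ofNat _ (by omega), pvToNat_ofNat _ (by omega)] at this
      exact pvChar_eq (by omega)

-- irreducibility of a stack: no two adjacent entries react
theorem pvStep_irred {st : List Char}
    (h : List.IsChain (fun x y => pvShouldBeRemoved x y = false) st) (c : Char) :
    List.IsChain (fun x y => pvShouldBeRemoved x y = false) (pvStep st c) := by
  match st with
  | [] => simp [pvStep]
  | h0 :: t =>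
    rw [pvStep]
    by_cases hr : pvShouldBeRemoved h0 c = true
    · rw [if_pos hr]; exact h.tail
    · rw [if_neg hr, List.isChain_cons_cons]
      exact ⟨by rw [pvShould_symm]; simpa using hr, h⟩

theorem pvFoldl_irred (xs : List Char) {st : List Char}
    (h : List.IsChain (fun x y => pvShouldBeRemoved x y = false) st) :
    List.IsChain (fun x y => pvShouldBeRemoved x y = false) (xs.foldl pvStep st) := by
  induction xs generalizing st with
  | nil => exact h
  | cons c cs ih => exact ih (pvStep_irred h c)

-- pushing a reacting pair through an irreducible stack is a no-op
theorem pvStep_step {st : List Char}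
    (h : List.IsChain (fun x y => pvShouldBeRemoved x y = false) st)
    {a b : Char} (hab : pvShouldBeRemoved a b = true) :
    pvStep (pvStep st a) b = st := by
  match st with
  | [] => simp [pvStep, hab]
  | h0 :: t =>
    by_cases hr : pvShouldBeRemoved h0 a = true
    · have hba : pvShouldBeRemoved b a = true := by rw [← pvShould_symm]; exact hab
      have hb0 : h0 = b := pvShould_uniq hr hba
      rw [pvStep, if_pos hr]
      match t with
      | [] => simp [pvStep, hb0]
      | h1 :: t1 =>
        have h01 : pvShouldBeRemoved h0 h1 = false := by
          rw [List.isChain_cons_cons] at h; exact h.1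
        rw [pvStep, if_neg (by rw [pvShould_symm, ← hb0]; simp [h01]), hb0]
    · rw [pvStep, if_neg hr, pvStep, if_pos hab]

-- removing a reacting pair anywhere does not change the stack reduction
theorem pvReduce_cut (pre post : List Char) {a b : Char} (hab : pvShouldBeRemoved a b = true) :
    (pre ++ a :: b :: post).foldl pvStep [] = (pre ++ post).foldl pvStep [] := by
  rw [List.foldl_append, List.foldl_append]
  show (a :: b :: post).foldl pvStep _ = _
  rw [List.foldl_cons, List.foldl_cons, pvStep_step (pvFoldl_irred pre (by simp)) hab]

-- a fully irreducible list reduces to its own reverse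
theorem pvReduce_of_chain : ∀ (xs st : List Char),
    List.IsChain (fun x y => pvShouldBeRemoved x y = false) xs →
    (∀ h t c cs, st = h :: t → xs = c :: cs → pvShouldBeRemoved h c = false) →
    xs.foldl pvStep st = xs.reverse ++ st := by
  intro xs
  induction xs with
  | nil => simp
  | cons c cs ih =>
    intro st hch hcomp
    have hstep : pvStep st c = c :: st := by
      match st with
      | [] => simp [pvStep]
      | h :: t => rw [pvStep, if_neg (by simp [hcomp h t c cs rfl rfl])]
    have hnext : ∀ h t c' cs', c :: st = h :: t → cs = c' :: cs' →
        pvShouldBeRemoved h c' = false := by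
      intro h t c' cs' hst hcs
      injection hst with hh ht
      subst hh
      have hc : List.IsChain (fun x y => pvShouldBeRemoved x y = false) (c :: c' :: cs') :=
        hcs ▸ hch
      rw [List.isChain_cons_cons] at hc
      exact hc.1
    rw [List.foldl_cons, hstep, ih (c :: st) hch.tail hnext]
    simp

theorem pvReduce_len_le (xs : List Char) : ∀ st : List Char,
    (xs.foldl pvStep st).length ≤ st.length + xs.length := by
  induction xs with
  | nil => simp
  | cons c cs ih =>
    intro st
    have h1 : (pvStep st c).length ≤ st.length + 1 := by
      cases st with
      | nil => simp [pvStep]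
      | cons h t => by_cases hr : pvShouldBeRemoved h c = true <;> simp [pvStep, hr] <;> omega
    have := ih (pvStep st c)
    simp only [List.foldl_cons, List.length_cons]
    omega

-- the scanned prefix contains no adjacent reacting pair
def pvOk (cl : List Char) (n : Nat) : Prop :=
  ∀ i a b, i + 1 < n → cl[i]? = some a → cl[i + 1]? = some b → pvShouldBeRemoved a b = false

theorem pvOk_chain {cl : List Char} {n : Nat} (hn : cl.length ≤ n) (h : pvOk cl n) :
    List.IsChain (fun x y => pvShouldBeRemoved x y = false) cl := by
  rw [List.isChain_iff_getElem]
  intro i hi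
  exact h i _ _ (by omega) (List.getElem?_eq_getElem (by omega)) (List.getElem?_eq_getElem (by omega))

-- splitting the list at a scanned pair
theorem pvDecomp {cl : List Char} {i : Nat} {a b : Char}
    (h1 : cl[i]? = some a) (h2 : cl[i + 1]? = some b) :
    cl = cl.take i ++ a :: b :: cl.drop (i + 2) := by
  have hi1 : i + 1 < cl.length := (List.getElem?_eq_some_iff.mp h2).1
  have e1 : cl[i]'(by omega) = a := (List.getElem?_eq_some_iff.mp h1).2
  have e2 : cl[i + 1]'hi1 = b := (List.getElem?_eq_some_iff.mp h2).2
  conv_lhs => rw [← List.take_append_drop i cl]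
  rw [List.drop_eq_getElem_cons (by omega), List.drop_eq_getElem_cons hi1, e1, e2]

-- main loop invariant: the loop returns the length of the stack reduction
theorem pvGoA_eq (cl : List Char) (index : Nat) (removedAny : Bool)
    (hok : removedAny = false → pvOk cl (index + 1))
    (hred : 2 ≤ (cl.foldl pvStep []).length) :
    pvGoA cl index removedAny = ((cl.foldl pvStep []).length : Int) := by
  induction cl, index, removedAny using pvGoA.induct with
  | case1 cl index hge =>
    rw [pvGoA, if_pos hge, if_pos rfl]
    have hch := pvOk_chain (n := index + 1) (by omega) (hok rfl)
    rw [pvReduce_of_chain cl [] hch (by intro _ _ _ _ h _; cases h)]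
    simp
  | case2 cl index removedAny hge hne a b h1 h2 hr ih =>
    rw [pvGoA, if_pos hge, if_neg hne, h1, h2]
    dsimp only
    rw [if_pos hr]
    have h1' : cl[0]? = some a := by have hc := h1; rw [PySem.List.pyGet?_natCast] at hc; exact hc
    have h2' : cl[0 + 1]? = some b := by have hc := h2; rw [PySem.List.pyGet?_natCast] at hc; exact hc
    have hcut : (pvCut cl 0).foldl pvStep [] = cl.foldl pvStep [] := by
      conv_rhs => rw [pvDecomp h1' h2']
      rw [pvReduce_cut _ _ hr, pvCut_eq_take_drop]
    rw [ih (by intro h; cases h) (by rw [hcut]; exact hred), hcut]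
  | case3 cl index removedAny hge hne a b h1 h2 hr ih =>
    rw [pvGoA, if_pos hge, if_neg hne, h1, h2]
    dsimp only
    rw [if_neg hr]
    refine ih ?_ hred
    intro _ i a' b' hi hA hB
    have hi0 : i = 0 := by omega
    subst hi0
    have h1' : cl[0]? = some a := by have hc := h1; rw [PySem.List.pyGet?_natCast] at hc; exact hc
    have h2' : cl[0 + 1]? = some b := by have hc := h2; rw [PySem.List.pyGet?_natCast] at hc; exact hc
    rw [h1'] at hA
    rw [h2'] at hB
    cases hA; cases hB
    simpa using hr
  | case4 cl index removedAny hge hne hnone =>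
    exfalso
    have hlen := pvReduce_len_le cl []
    have hcl : 2 ≤ cl.length := by simp at hlen; omega
    exact hnone (cl[0]'(by omega)) (cl[1]'(by omega))
      (by rw [PySem.List.pyGet?_natCast]; exact List.getElem?_eq_getElem (by omega))
      (by rw [PySem.List.pyGet?_natCast]; exact List.getElem?_eq_getElem (by omega))
  | case5 cl index removedAny hlt a b h1 h2 hr ih =>
    rw [pvGoA, if_neg hlt, h1, h2]
    dsimp only
    rw [if_pos hr]
    have h1' : cl[index]? = some a := by have hc := h1; rw [PySem.List.pyGet?_natCast] at hc; exact hc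
    have h2' : cl[index + 1]? = some b := by have hc := h2; rw [PySem.List.pyGet?_natCast] at hc; exact hc
    have hcut : (pvCut cl index).foldl pvStep [] = cl.foldl pvStep [] := by
      conv_rhs => rw [pvDecomp h1' h2']
      rw [pvReduce_cut _ _ hr, pvCut_eq_take_drop]
    rw [ih (by intro h; cases h) (by rw [hcut]; exact hred), hcut]
  | case6 cl index removedAny hlt a b h1 h2 hr ih =>
    rw [pvGoA, if_neg hlt, h1, h2]
    dsimp only
    rw [if_neg hr]
    refine ih ?_ hred
    intro hra i a' b' hi hA hB
    by_cases hc : i + 1 < index + 1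
    · exact hok hra i a' b' hc hA hB
    · have hii : i = index := by omega
      subst hii
      have h1' : cl[i]? = some a := by have hc := h1; rw [PySem.List.pyGet?_natCast] at hc; exact hc
      have h2' : cl[i + 1]? = some b := by have hc := h2; rw [PySem.List.pyGet?_natCast] at hc; exact hc
      rw [h1'] at hA
      rw [h2'] at hB
      cases hA; cases hB
      simpa using hr
  | case7 cl index removedAny hlt hnone =>
    exfalso
    exact hnone (cl[index]'(by omega)) (cl[index + 1]'(by omega))
      (by rw [PySem.List.pyGet?_natCast]; exact List.getElem?_eq_getElem (by omega))
      (by rw [PySem.List.pyGet?_natCast]; exact List.getElem?_eq_getElem (by omega))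

-- ===== VERDICT (by name: the statement is the Claim_ definition above) =====
theorem removePolymers_spec : Claim_equal_removePolymers := by
  intro s _ hpre
  unfold Spec_removePolymers removePolymers removePolymers_alt
  rcases hpre with hlen | hred
  · have hch : List.IsChain (fun x y => pvShouldBeRemoved x y = false) s.toList := by
      match h : s.toList with
      | [] => simp
      | [c] => simp
      | a :: b :: t => rw [h] at hlen; simp at hlen
    rw [pvGoA, if_pos (by omega), if_pos rfl,
      pvReduce_of_chain s.toList [] hch (by intro _ _ _ _ h _; cases h)]
    simp
  · rw [pvGoA_eq s.toList 0 false (fun _ => by intro i a b hi _ _; omega) hred]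

@[simp] theorem removePolymers_raises : Claim_raises_removePolymers := by
  unfold Claim_raises_removePolymers
  constructor
  · intro s _ hr hp
    rcases hr with ⟨h1, h2⟩
    rcases hp with h | h <;> omega
  · exact ⟨by decide, by decide, by decide⟩
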